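-- pv_equiv track=rewrite | github.com/jes5199/numbercrosswords | equation.py | has_leading_zeros
-- ===== SOURCE A (Python) =====
-- DIGIT_CHARS = set("0123456789")
--
-- def has_leading_zeros(chars: list[str]) -> bool:
--     """Check if any multi-digit number has a leading zero.
--
--     E.g., "08" is invalid, but "0" alone is fine.
--     """
--     i = 0
--     while i < len(chars):
--         if chars[i] in DIGIT_CHARS:
--             # Found start of a number
--             num_start = i
--             while i < len(chars) and chars[i] in DIGIT_CHARS:
--                 i += 1
--             num_len = i - num_start
--             # Leading zero if number has multiple digits and starts with 0
--             if num_len > 1 and chars[num_start] == "0":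
--                 return True
--         else:
--             i += 1
--     return False
-- ===== SOURCE B (Python) =====
-- DIGIT_CHARS = set("0123456789")
--
--
-- def _zero_start(chars, i):
--     # index i starts a multi-digit number with a leading zero
--     return (chars[i] == "0"
--             and (i == 0 or chars[i - 1] not in DIGIT_CHARS)
--             and i + 1 < len(chars)
--             and chars[i + 1] in DIGIT_CHARS)
--
--
-- def has_leading_zeros(chars: list[str]) -> bool:
--     """Check if any multi-digit number has a leading zero."""
--     return any(_zero_start(chars, i) for i in range(len(chars)))
-- ===== Notes on version B (the rewrite author's own statement) =====
-- stated objective: simpler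
-- what changed: Replaced the nested while loops that find each digit run and measure its length by a single any() over indices testing a local 3-character condition ('0' at a run start followed by a digit); no run length is computed.
import Mathlib
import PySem

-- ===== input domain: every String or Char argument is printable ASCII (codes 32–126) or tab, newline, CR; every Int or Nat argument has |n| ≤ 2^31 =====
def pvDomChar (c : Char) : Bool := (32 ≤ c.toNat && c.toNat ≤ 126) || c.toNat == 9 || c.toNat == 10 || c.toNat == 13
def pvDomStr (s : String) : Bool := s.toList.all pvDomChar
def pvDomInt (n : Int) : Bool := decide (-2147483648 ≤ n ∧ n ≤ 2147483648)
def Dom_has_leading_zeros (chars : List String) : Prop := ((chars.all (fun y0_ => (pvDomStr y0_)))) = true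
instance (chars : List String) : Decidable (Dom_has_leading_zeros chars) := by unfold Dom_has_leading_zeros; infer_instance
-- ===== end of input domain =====

-- B replaces A's nested run-finding while loops by a single any() over indices
-- testing a local "zero at a run start followed by a digit" condition (objective: simpler).

-- shared module-level constant: DIGIT_CHARS = set("0123456789")
def DIGIT_CHARS : List String := ["0","1","2","3","4","5","6","7","8","9"]

-- `s in DIGIT_CHARS`
def isDigitS (s : String) : Bool := DIGIT_CHARS.contains s

-- ===== PORT A =====
-- inner `while i < len(chars) and chars[i] in DIGIT_CHARS: i += 1`
def runEnd (chars : List String) (i : Nat) : Nat :=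
  if _h : i < chars.length then
    if isDigitS (chars.getD i "") then runEnd chars (i+1) else i
  else i
termination_by chars.length - i
decreasing_by omega

-- termination fact for the outer loop: a digit run advances the index
theorem runEnd_ge (chars : List String) (i : Nat) : i ≤ runEnd chars i := by
  induction i using runEnd.induct chars with
  | case1 j hj hd ih => rw [runEnd, dif_pos hj, if_pos hd]; omega
  | case2 j hj hd => rw [runEnd, dif_pos hj, if_neg hd]
  | case3 j hj => rw [runEnd, dif_neg hj]

theorem runEnd_gt (chars : List String) (i : Nat) (h : i < chars.length)
    (hd : isDigitS (chars.getD i "") = true) : i < runEnd chars i := by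
  rw [runEnd, dif_pos h, if_pos hd]
  have := runEnd_ge chars (i+1)
  omega

-- outer while loop of A
def loopA (chars : List String) (i : Nat) : Bool :=
  if h : i < chars.length then
    if hd : isDigitS (chars.getD i "") then
      -- num_start = i; inner while; num_len = runEnd - num_start
      if runEnd chars i - i > 1 && chars.getD i "" == "0" then true
      else loopA chars (runEnd chars i)
    else loopA chars (i+1)
  else false
termination_by chars.length - i
decreasing_by
  · have := runEnd_gt chars i h hd; omega
  · omega

def has_leading_zeros (chars : List String) : Bool := loopA chars 0

-- ===== PORT B =====
-- _zero_start(chars, i)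
def zeroStart (chars : List String) (i : Nat) : Bool :=
  chars.getD i "" == "0"
    && (i == 0 || !isDigitS (chars.getD (i-1) ""))
    && decide (i + 1 < chars.length)
    && isDigitS (chars.getD (i+1) "")

-- any(_zero_start(chars, i) for i in range(len(chars)))
def has_leading_zeros_alt (chars : List String) : Bool :=
  (List.range chars.length).any (fun i => zeroStart chars i)

-- ===== PRECONDITION & SPEC =====
def Spec_has_leading_zeros (chars : List String) (out : Bool) : Prop := out = has_leading_zeros_alt chars
instance (chars : List String) (out : Bool) : Decidable (Spec_has_leading_zeros chars out) := by unfold Spec_has_leading_zeros; infer_instance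

-- ===== CLAIM (what is proved, stated in full; the proofs are below) =====
def Claim_equal_has_leading_zeros : Prop := ∀ (chars : List String), Dom_has_leading_zeros chars → Spec_has_leading_zeros chars (has_leading_zeros chars)

-- ===== LEMMAS AND PROOFS =====

theorem runEnd_le (chars : List String) (i : Nat) (h : i ≤ chars.length) :
    runEnd chars i ≤ chars.length := by
  induction i using runEnd.induct chars with
  | case1 j hj hd ih => rw [runEnd, dif_pos hj, if_pos hd]; exact ih hj
  | case2 j hj hd => rw [runEnd, dif_pos hj, if_neg hd]; omega
  | case3 j hj => rw [runEnd, dif_neg hj]; omega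

theorem runEnd_digit (chars : List String) (i : Nat) :
    ∀ k, i ≤ k → k < runEnd chars i → isDigitS (chars.getD k "") = true := by
  induction i using runEnd.induct chars with
  | case1 j hj hd ih =>
    intro k hk1 hk2
    rw [runEnd, dif_pos hj, if_pos hd] at hk2
    rcases Nat.eq_or_lt_of_le hk1 with rfl | h
    · exact hd
    · exact ih k h hk2
  | case2 j hj hd =>
    intro k hk1 hk2
    rw [runEnd, dif_pos hj, if_neg hd] at hk2; omega
  | case3 j hj =>
    intro k hk1 hk2
    rw [runEnd, dif_neg hj] at hk2; omega

theorem runEnd_stop (chars : List String) (i : Nat) :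
    runEnd chars i = chars.length ∨
      (runEnd chars i < chars.length ∧ isDigitS (chars.getD (runEnd chars i) "") = false) ∨
      chars.length ≤ i := by
  induction i using runEnd.induct chars with
  | case1 j hj hd ih =>
    rw [runEnd, dif_pos hj, if_pos hd]
    rcases ih with h | h | h
    · left; exact h
    · right; left; exact h
    · have : runEnd chars (j+1) = j+1 := by rw [runEnd, dif_neg (by omega)]
      left; omega
  | case2 j hj hd =>
    rw [runEnd, dif_pos hj, if_neg hd]
    exact Or.inr (Or.inl ⟨hj, Bool.not_eq_true _ ▸ Bool.eq_false_iff.mpr (by simpa using hd)⟩)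
  | case3 j hj => right; right; omega

-- loop invariant for A's outer loop: at entry, i is past the list, at 0,
-- just after a non-digit, or itself a non-digit position
def Hinv (chars : List String) (i : Nat) : Prop :=
  chars.length ≤ i ∨ i = 0 ∨ isDigitS (chars.getD (i-1) "") = false ∨
    isDigitS (chars.getD i "") = false

theorem zeroStart_lt (chars : List String) (k : Nat) (h : zeroStart chars k = true) :
    k < chars.length := by
  unfold zeroStart at h
  simp only [Bool.and_eq_true, decide_eq_true_eq] at h
  omega

theorem loopA_iff (chars : List String) (i : Nat) (h : Hinv chars i) :
    loopA chars i = true ↔ ∃ k, i ≤ k ∧ zeroStart chars k = true := by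
  rw [loopA]
  by_cases hlen : i < chars.length
  · rw [dif_pos hlen]
    by_cases hd : isDigitS (chars.getD i "") = true
    · rw [dif_pos hd]
      have hji : i < runEnd chars i := runEnd_gt chars i hlen hd
      have hjle : runEnd chars i ≤ chars.length := runEnd_le chars i (le_of_lt hlen)
      by_cases hret : (runEnd chars i - i > 1 && chars.getD i "" == "0") = true
      · rw [if_pos hret]
        simp only [true_iff]
        refine ⟨i, le_refl i, ?_⟩
        simp only [Bool.and_eq_true, decide_eq_true_eq] at hret
        have hnext : isDigitS (chars.getD (i+1) "") = true :=
          runEnd_digit chars i (i+1) (by omega) (by omega)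
        have hstart : (i == 0 || !isDigitS (chars.getD (i-1) "")) = true := by
          simp only [Bool.or_eq_true, beq_iff_eq, Bool.not_eq_true']
          rcases h with h | h | h | h
          · omega
          · exact Or.inl h
          · exact Or.inr h
          · rw [h] at hd; exact absurd hd (by simp)
        unfold zeroStart
        simp only [Bool.and_eq_true, decide_eq_true_eq]
        exact ⟨⟨⟨hret.2, hstart⟩, by omega⟩, hnext⟩
      · rw [if_neg hret]
        have hH : Hinv chars (runEnd chars i) := by
          rcases runEnd_stop chars i with hs | hs | hs
          · left; omega
          · right; right; right; exact hs.2
          · omega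
        rw [loopA_iff chars (runEnd chars i) hH]
        constructor
        · rintro ⟨k, hk1, hk2⟩; exact ⟨k, by omega, hk2⟩
        · rintro ⟨k, hk1, hk2⟩
          refine ⟨k, ?_, hk2⟩
          by_contra hklt
          push Not at hklt
          -- k ∈ [i, runEnd i): show zeroStart fails there
          unfold zeroStart at hk2
          simp only [Bool.and_eq_true, decide_eq_true_eq, Bool.or_eq_true, beq_iff_eq,
            Bool.not_eq_true'] at hk2
          obtain ⟨⟨⟨hz, hst⟩, hb⟩, hnd⟩ := hk2
          rcases Nat.eq_or_lt_of_le hk1 with rfl | hik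
          · -- k = i: the return test of A failed
            simp only [Bool.and_eq_true, decide_eq_true_eq, not_and_or] at hret
            rcases hret with hlen2 | hz2
            · -- runEnd - k ≤ 1, so runEnd = k + 1; position k+1 is not a digit (or past the end)
              have hj1 : runEnd chars i = i + 1 := by omega
              rcases runEnd_stop chars i with hs | hs | hs
              · omega
              · rw [hj1] at hs; rw [hs.2] at hnd; exact absurd hnd (by simp)
              · omega
            · exact hz2 (by simpa using hz)
          · -- i < k < runEnd i: chars[k-1] is a digit, contradicting the run-start test
            have hkd : isDigitS (chars.getD (k-1) "") = true :=
              runEnd_digit chars i (k-1) (by omega) (by omega)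
            rcases hst with h0 | hnd'
            · omega
            · rw [hkd] at hnd'; exact absurd hnd' (by simp)
    · rw [dif_neg hd]
      have hH : Hinv chars (i+1) := by
        right; right; left
        simpa using Bool.eq_false_iff.mpr hd
      rw [loopA_iff chars (i+1) hH]
      constructor
      · rintro ⟨k, hk1, hk2⟩; exact ⟨k, by omega, hk2⟩
      · rintro ⟨k, hk1, hk2⟩
        refine ⟨k, ?_, hk2⟩
        rcases Nat.eq_or_lt_of_le hk1 with rfl | hik
        · -- k = i is not a digit, but zeroStart needs chars[k] == "0"
          unfold zeroStart at hk2
          simp only [Bool.and_eq_true, beq_iff_eq] at hk2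
          rw [hk2.1.1.1] at hd
          exact absurd (by decide : isDigitS "0" = true) hd
        · omega
  · rw [dif_neg hlen]
    simp only [Bool.false_eq_true, false_iff]
    rintro ⟨k, hk1, hk2⟩
    have := zeroStart_lt chars k hk2
    omega
termination_by chars.length - i
decreasing_by
  · have := runEnd_gt chars i hlen hd; omega
  · omega

theorem alt_iff (chars : List String) :
    has_leading_zeros_alt chars = true ↔ ∃ k, 0 ≤ k ∧ zeroStart chars k = true := by
  unfold has_leading_zeros_alt
  simp only [List.any_eq_true, List.mem_range]
  constructor
  · rintro ⟨k, _, hk⟩; exact ⟨k, Nat.zero_le k, hk⟩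
  · rintro ⟨k, _, hk⟩; exact ⟨k, zeroStart_lt chars k hk, hk⟩

-- ===== VERDICT (by name: the statement is the Claim_ definition above) =====
theorem has_leading_zeros_spec : Claim_equal_has_leading_zeros := by
  intro chars _
  unfold Spec_has_leading_zeros has_leading_zeros
  have h := (loopA_iff chars 0 (Or.inr (Or.inl rfl))).trans (alt_iff chars).symm
  exact Bool.eq_iff_iff.mpr h
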